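-- pv_equiv track=rewrite | github.com/spbui00/influence-rlvr | influence_rlvr/trajectory.py | _thin_checkpoint_schedule_piecewise
-- ===== SOURCE A (Python) =====
-- def _thin_checkpoint_schedule_piecewise(
--     schedule,
--     early_last_index,
--     mid_last_index,
--     mid_stride,
--     late_stride,
-- ):
--     thinned = []
--     for i, cp in enumerate(schedule):
--         if i <= early_last_index:
--             thinned.append(cp)
--         elif i <= mid_last_index:
--             if mid_stride <= 0 or i % mid_stride == 0:
--                 thinned.append(cp)
--         else:
--             if late_stride <= 0 or i % late_stride == 0:
--                 thinned.append(cp)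
--     return thinned
-- ===== SOURCE B (Python) =====
-- def _thin_checkpoint_schedule_piecewise(
--     schedule,
--     early_last_index,
--     mid_last_index,
--     mid_stride,
--     late_stride,
-- ):
--     n = len(schedule)
--     early_end = max(0, min(early_last_index + 1, n))
--     mid_end = max(early_end, min(mid_last_index + 1, n))
--     head = schedule[:early_end]
--     mid_part = [
--         cp
--         for i, cp in enumerate(schedule[early_end:mid_end], early_end)
--         if mid_stride <= 0 or i % mid_stride == 0
--     ]
--     late_part = [
--         cp
--         for i, cp in enumerate(schedule[mid_end:], mid_end)
--         if late_stride <= 0 or i % late_stride == 0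
--     ]
--     return head + mid_part + late_part
-- ===== Notes on version B (the rewrite author's own statement) =====
-- stated objective: alternative
-- what changed: Replaces the single per-element three-way branch loop by computing the two clamped segment boundaries up front and concatenating three independently built parts (a plain slice plus two enumerate-comprehensions).
import Mathlib
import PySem

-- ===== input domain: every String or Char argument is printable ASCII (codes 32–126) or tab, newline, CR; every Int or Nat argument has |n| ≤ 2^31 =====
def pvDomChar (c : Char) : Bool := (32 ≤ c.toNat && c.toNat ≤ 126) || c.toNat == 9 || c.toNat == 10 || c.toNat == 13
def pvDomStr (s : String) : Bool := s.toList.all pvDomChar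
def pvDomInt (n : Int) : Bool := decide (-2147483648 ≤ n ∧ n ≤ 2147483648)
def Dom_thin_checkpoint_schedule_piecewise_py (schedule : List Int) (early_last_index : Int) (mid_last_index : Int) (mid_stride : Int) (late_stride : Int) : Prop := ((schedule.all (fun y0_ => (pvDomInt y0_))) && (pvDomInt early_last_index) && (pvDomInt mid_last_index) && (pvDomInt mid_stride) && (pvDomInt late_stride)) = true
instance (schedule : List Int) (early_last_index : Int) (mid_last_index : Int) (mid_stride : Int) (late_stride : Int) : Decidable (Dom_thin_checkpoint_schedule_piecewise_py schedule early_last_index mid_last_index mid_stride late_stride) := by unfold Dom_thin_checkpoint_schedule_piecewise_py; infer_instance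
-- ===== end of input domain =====

-- B partitions the schedule into three segments up front (clamped boundaries) instead of
-- A's per-element three-way branch in one loop; objective: alternative decomposition, same cost.

-- ===== PORT A =====
-- literal port of A: one fold over enumerate(schedule), appending per the branch chain
def thin_checkpoint_schedule_piecewise_py (schedule : List Int) (early_last_index : Int) (mid_last_index : Int) (mid_stride : Int) (late_stride : Int) : List Int :=
  (PySem.List.enumerate schedule 0).foldl
    (fun thinned p =>
      if p.1 ≤ early_last_index then thinned ++ [p.2]
      else if p.1 ≤ mid_last_index then
        if mid_stride ≤ 0 ∨ PySem.Int.mod p.1 mid_stride = 0 then thinned ++ [p.2] else thinned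
      else
        if late_stride ≤ 0 ∨ PySem.Int.mod p.1 late_stride = 0 then thinned ++ [p.2] else thinned)
    []

-- ===== PORT B =====
-- literal port of Source B: clamp the two boundaries, then head slice ++ two filtered enumerations
def thin_checkpoint_schedule_piecewise_py_alt (schedule : List Int) (early_last_index : Int) (mid_last_index : Int) (mid_stride : Int) (late_stride : Int) : List Int :=
  let n : Int := schedule.length
  let early_end := max 0 (min (early_last_index + 1) n)
  let mid_end := max early_end (min (mid_last_index + 1) n)
  let head := PySem.List.slice schedule none (some early_end)
  let mid_part := (PySem.List.enumerate (PySem.List.slice schedule (some early_end) (some mid_end)) early_end).filterMap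
      (fun q => if mid_stride ≤ 0 ∨ PySem.Int.mod q.1 mid_stride = 0 then some q.2 else none)
  let late_part := (PySem.List.enumerate (PySem.List.slice schedule (some mid_end) none) mid_end).filterMap
      (fun q => if late_stride ≤ 0 ∨ PySem.Int.mod q.1 late_stride = 0 then some q.2 else none)
  head ++ mid_part ++ late_part

-- ===== PRECONDITION & SPEC =====
def Spec_thin_checkpoint_schedule_piecewise_py (schedule : List Int) (early_last_index : Int) (mid_last_index : Int) (mid_stride : Int) (late_stride : Int) (out : List Int) : Prop := out = thin_checkpoint_schedule_piecewise_py_alt schedule early_last_index mid_last_index mid_stride late_stride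
instance (schedule : List Int) (early_last_index : Int) (mid_last_index : Int) (mid_stride : Int) (late_stride : Int) (out : List Int) : Decidable (Spec_thin_checkpoint_schedule_piecewise_py schedule early_last_index mid_last_index mid_stride late_stride out) := by unfold Spec_thin_checkpoint_schedule_piecewise_py; infer_instance

-- ===== CLAIM (what is proved, stated in full; the proofs are below) =====
def Claim_equal_thin_checkpoint_schedule_piecewise_py : Prop := ∀ (schedule : List Int) (early_last_index : Int) (mid_last_index : Int) (mid_stride : Int) (late_stride : Int), Dom_thin_checkpoint_schedule_piecewise_py schedule early_last_index mid_last_index mid_stride late_stride → Spec_thin_checkpoint_schedule_piecewise_py schedule early_last_index mid_last_index mid_stride late_stride (thin_checkpoint_schedule_piecewise_py schedule early_last_index mid_last_index mid_stride late_stride)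

-- ===== LEMMAS AND PROOFS =====

-- index-filtered selection: keep element at global index i iff p i
def pvFsel (p : Int → Bool) : Int → List Int → List Int
  | _, [] => []
  | i, c :: cs => if p i then c :: pvFsel p (i + 1) cs else pvFsel p (i + 1) cs

-- A's per-element decision as a predicate on the global index
def pvKeep (e_ m_ ms ls : Int) (i : Int) : Bool :=
  if i ≤ e_ then true
  else if i ≤ m_ then decide (ms ≤ 0 ∨ PySem.Int.mod i ms = 0)
  else decide (ls ≤ 0 ∨ PySem.Int.mod i ls = 0)

lemma pvFoldlA (e_ m_ ms ls : Int) (xs : List Int) : ∀ (i : Int) (acc : List Int),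
    (PySem.List.enumerate xs i).foldl
      (fun thinned p =>
        if p.1 ≤ e_ then thinned ++ [p.2]
        else if p.1 ≤ m_ then
          if ms ≤ 0 ∨ PySem.Int.mod p.1 ms = 0 then thinned ++ [p.2] else thinned
        else
          if ls ≤ 0 ∨ PySem.Int.mod p.1 ls = 0 then thinned ++ [p.2] else thinned)
      acc = acc ++ pvFsel (pvKeep e_ m_ ms ls) i xs := by
  induction xs with
  | nil => intro i acc; simp [PySem.List.enumerate_nil, pvFsel]
  | cons c cs ih =>
    intro i acc
    rw [PySem.List.enumerate_cons, List.foldl_cons]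
    by_cases h1 : i ≤ e_
    · simp [pvFsel, pvKeep, ih, h1]
    · by_cases h2 : i ≤ m_
      · by_cases h3 : ms ≤ 0 ∨ PySem.Int.mod i ms = 0
        · simp [pvFsel, pvKeep, ih, h1, h2, h3]
        · simp [pvFsel, pvKeep, ih, h1, h2, h3]
      · by_cases h3 : ls ≤ 0 ∨ PySem.Int.mod i ls = 0
        · simp [pvFsel, pvKeep, ih, h1, h2, h3]
        · simp [pvFsel, pvKeep, ih, h1, h2, h3]

lemma pvFsel_filterMap (P : Int → Prop) [DecidablePred P] (xs : List Int) : ∀ i : Int,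
    (PySem.List.enumerate xs i).filterMap (fun q => if P q.1 then some q.2 else none)
      = pvFsel (fun j => decide (P j)) i xs := by
  induction xs with
  | nil => intro i; simp [PySem.List.enumerate_nil, pvFsel]
  | cons c cs ih =>
    intro i
    simp only [PySem.List.enumerate_cons, List.filterMap_cons, pvFsel]
    split_ifs <;> simp_all

lemma pvFsel_congr (p q : Int → Bool) (xs : List Int) : ∀ i : Int,
    (∀ j, i ≤ j → j < i + xs.length → p j = q j) → pvFsel p i xs = pvFsel q i xs := by
  induction xs with
  | nil => intro i _; rfl
  | cons c cs ih =>
    intro i h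
    have hi : p i = q i := h i le_rfl (by simp only [List.length_cons]; push_cast; omega)
    simp only [pvFsel, hi]
    have := ih (i + 1) (fun j h1 h2 => h j (by omega)
      (by simp only [List.length_cons]; push_cast at h2 ⊢; omega))
    rw [this]

lemma pvFsel_all_true (p : Int → Bool) (xs : List Int) : ∀ i : Int,
    (∀ j, i ≤ j → j < i + xs.length → p j = true) → pvFsel p i xs = xs := by
  induction xs with
  | nil => intro i _; rfl
  | cons c cs ih =>
    intro i h
    have hi : p i = true := h i le_rfl (by simp only [List.length_cons]; push_cast; omega)
    simp only [pvFsel, hi, if_true]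
    rw [ih (i + 1) (fun j h1 h2 => h j (by omega)
      (by simp only [List.length_cons]; push_cast at h2 ⊢; omega))]

lemma pvFsel_append (p : Int → Bool) (xs ys : List Int) : ∀ i : Int,
    pvFsel p i (xs ++ ys) = pvFsel p i xs ++ pvFsel p (i + xs.length) ys := by
  induction xs with
  | nil => intro i; simp [pvFsel]
  | cons c cs ih =>
    intro i
    simp only [List.cons_append, pvFsel, ih (i + 1)]
    split_ifs <;> simp <;> ring_nf

-- ===== VERDICT (by name: the statement is the Claim_ definition above) =====
theorem thin_checkpoint_schedule_piecewise_py_spec : Claim_equal_thin_checkpoint_schedule_piecewise_py := by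
  intro schedule e_ m_ ms ls _dom
  unfold Spec_thin_checkpoint_schedule_piecewise_py
  unfold thin_checkpoint_schedule_piecewise_py thin_checkpoint_schedule_piecewise_py_alt
  simp only []
  set n : Int := (schedule.length : Int) with hn
  have hn0 : 0 ≤ n := by positivity
  set e : Int := max 0 (min (e_ + 1) n) with he
  set m : Int := max e (min (m_ + 1) n) with hm
  have he0 : 0 ≤ e := by omega
  have hen : e ≤ n := by omega
  have hem : e ≤ m := by omega
  have hmn : m ≤ n := by omega
  -- rewrite B's slices
  rw [PySem.List.slice_to _ he0, PySem.List.slice_toNat _ he0 (by omega),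
      PySem.List.slice_from _ (by omega)]
  -- rewrite A's fold
  rw [pvFoldlA, List.nil_append]
  -- split the schedule into the three segments
  have hsplit : schedule
      = schedule.take e.toNat
        ++ ((schedule.drop e.toNat).take (m.toNat - e.toNat) ++ schedule.drop m.toNat) := by
    have h1 : (schedule.drop e.toNat).drop (m.toNat - e.toNat) = schedule.drop m.toNat := by
      rw [List.drop_drop]; congr 1; omega
    rw [← h1, List.take_append_drop, List.take_append_drop]
  have hlen1 : ((schedule.take e.toNat).length : Int) = e := by
    simp [List.length_take]; omega
  have hlen2 : (((schedule.drop e.toNat).take (m.toNat - e.toNat)).length : Int) = m - e := by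
    simp [List.length_take, List.length_drop]; omega
  conv_lhs => rw [hsplit]
  rw [pvFsel_append, pvFsel_append, hlen1, hlen2]
  have hme : (0 : Int) + e + (m - e) = m := by ring
  have h0e : (0 : Int) + e = e := by ring
  rw [hme, h0e, List.append_assoc]
  congr 1
  · -- head: every index in [0, e) satisfies i ≤ e_
    rw [pvFsel_all_true]
    intro j hj1 hj2
    rw [hlen1] at hj2
    have hje : j ≤ e_ := by omega
    simp [pvKeep, hje]
  congr 1
  · -- middle segment
    rw [pvFsel_filterMap (fun j => ms ≤ 0 ∨ PySem.Int.mod j ms = 0)]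
    apply pvFsel_congr
    intro j hj1 hj2
    rw [hlen2] at hj2
    have h1 : ¬ j ≤ e_ := by omega
    have h2 : j ≤ m_ := by omega
    simp [pvKeep, h1, h2]
  · -- late segment
    rw [pvFsel_filterMap (fun j => ls ≤ 0 ∨ PySem.Int.mod j ls = 0)]
    apply pvFsel_congr
    intro j hj1 hj2
    simp only [List.length_drop] at hj2
    have h1 : ¬ j ≤ e_ := by omega
    have h2 : ¬ j ≤ m_ := by omega
    simp [pvKeep, h1, h2]
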